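-- pv_equiv track=rewrite | github.com/pypi-data/pypi-mirror-369 | packages/bprogress/bprogress-0.2.6.tar.gz/bprogress-0.2.6/src/braille_progress/braille.py | _cell
-- ===== SOURCE A (Python) =====
-- _DOT_ORDER = (1, 2, 3, 7, 4, 5, 6, 8)
--
-- _EMPTY = "\u2800"
--
-- def _cell(dots: int) -> str:
--     n = max(0, min(8, int(dots)))
--     if n == 0:
--         return _EMPTY
--     m = 0
--     for k in range(n):
--         d = _DOT_ORDER[k]
--         m |= 1 << (d - 1)
--     return chr(0x2800 + m)
-- ===== SOURCE B (Python) =====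
-- _EMPTY = "\u2800"
--
-- # Entry i = Braille char with the first i dots of the fill order set (entry 0 is _EMPTY).
-- _TABLE = (
--     "\u2800", "\u2801", "\u2803", "\u2807", "\u2847",
--     "\u284F", "\u285F", "\u287F", "\u28FF",
-- )
--
-- def _cell(dots: int) -> str:
--     return _TABLE[max(0, min(8, int(dots)))]
-- ===== Notes on version B (the rewrite author's own statement) =====
-- stated objective: simpler
-- what changed: Replaced the per-call bit-OR loop over the dot order (and the n==0 special case) with a single lookup into a precomputed precomputed prefix table of Braille characters.
import Mathlib
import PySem

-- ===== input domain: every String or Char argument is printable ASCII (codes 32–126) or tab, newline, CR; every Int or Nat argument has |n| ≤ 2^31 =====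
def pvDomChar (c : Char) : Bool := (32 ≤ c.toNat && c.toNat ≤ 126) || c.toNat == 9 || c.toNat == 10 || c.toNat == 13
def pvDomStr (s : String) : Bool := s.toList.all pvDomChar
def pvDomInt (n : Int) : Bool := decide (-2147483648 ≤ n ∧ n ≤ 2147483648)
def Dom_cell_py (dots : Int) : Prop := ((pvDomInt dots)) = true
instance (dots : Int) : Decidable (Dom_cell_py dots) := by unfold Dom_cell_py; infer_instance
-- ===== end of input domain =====

-- B replaces A's per-call bit-accumulation loop by a direct index into a precomputed prefix table (objective: simpler).

-- ===== PORT A =====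
def dotOrder : List Int := [1, 2, 3, 7, 4, 5, 6, 8]

-- exact: `1 << (d-1)` is `2 ^ (d-1)`; `m |= …` is Int.lor; chr(c) builds the one-char string
def cell_py (dots : Int) : String :=
  let n : Int := max 0 (min 8 dots)
  if n = 0 then "\u2800"
  else
    let m : Int := (PySem.List.pyRange 0 n 1).foldl
      (fun m k =>
        let d : Int := (PySem.List.pyGet? dotOrder k).getD 0
        Int.lor m ((2 : Int) ^ (d - 1).toNat)) 0
    String.ofList [Char.ofNat (0x2800 + m).toNat]

-- ===== PORT B =====
-- entry i = Braille char with the first i dots of the fill order set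
def brailleTable : List String :=
  ["\u2800", "\u2801", "\u2803", "\u2807", "\u2847",
   "\u284F", "\u285F", "\u287F", "\u28FF"]

def cell_py_alt (dots : Int) : String :=
  brailleTable.getD (max 0 (min 8 dots)).toNat "\u2800"

-- ===== PRECONDITION & SPEC =====
def Spec_cell_py (dots : Int) (out : String) : Prop := out = cell_py_alt dots
instance (dots : Int) (out : String) : Decidable (Spec_cell_py dots out) := by unfold Spec_cell_py; infer_instance

-- ===== CLAIM (what is proved, stated in full; the proofs are below) =====
def Claim_equal_cell_py : Prop := ∀ (dots : Int), Dom_cell_py dots → Spec_cell_py dots (cell_py dots)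

-- ===== LEMMAS AND PROOFS =====
theorem cell_py_eq_alt (dots : Int) : cell_py dots = cell_py_alt dots := by
  have h : max 0 (min 8 dots) = 0 ∨ max 0 (min 8 dots) = 1 ∨ max 0 (min 8 dots) = 2 ∨
      max 0 (min 8 dots) = 3 ∨ max 0 (min 8 dots) = 4 ∨ max 0 (min 8 dots) = 5 ∨
      max 0 (min 8 dots) = 6 ∨ max 0 (min 8 dots) = 7 ∨ max 0 (min 8 dots) = 8 := by omega
  unfold cell_py cell_py_alt
  rcases h with h|h|h|h|h|h|h|h|h <;> rw [h] <;> decide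

-- ===== VERDICT (by name: the statement is the Claim_ definition above) =====
theorem cell_py_spec : Claim_equal_cell_py := by
  intro dots _
  exact cell_py_eq_alt dots
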